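-- pv_equiv track=rewrite | github.com/SherzodOtajonov/cp-stuff | codeforces/2020/problemset/Chat_Room.py | solve
-- ===== SOURCE A (Python) =====
-- def solve(s, w, i):
--     if w[i] == 'o' and w[i] in s:
--         return 'YES'
--     elif w[i] == 'o' and w[i] not in s:
--         return 'NO'
--     try:
--         c = s.index(w[i])
--     except ValueError:
--         return 'NO'
--     return solve(s[c+1:], w, i+1)
-- ===== SOURCE B (Python) =====
-- def solve(s, w, i):
--     # Single pass over s consuming a pointer into w, instead of A's recursion
--     # that re-slices s and searches with s.index at every step.
--     c = w[i]
--     for ch in s: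
--         if c == 'o':
--             if ch == 'o':
--                 return 'YES'
--         elif ch == c:
--             i += 1
--             c = w[i]
--     return 'NO'
-- ===== Notes on version B (the rewrite author's own statement) =====
-- stated objective: alternative
-- what changed: Replaced A's recursion over w that re-slices s and calls s.index at every step with a single for-loop over the characters of s that consumes a pointer into w, so s is traversed once and never copied.
import Mathlib
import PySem

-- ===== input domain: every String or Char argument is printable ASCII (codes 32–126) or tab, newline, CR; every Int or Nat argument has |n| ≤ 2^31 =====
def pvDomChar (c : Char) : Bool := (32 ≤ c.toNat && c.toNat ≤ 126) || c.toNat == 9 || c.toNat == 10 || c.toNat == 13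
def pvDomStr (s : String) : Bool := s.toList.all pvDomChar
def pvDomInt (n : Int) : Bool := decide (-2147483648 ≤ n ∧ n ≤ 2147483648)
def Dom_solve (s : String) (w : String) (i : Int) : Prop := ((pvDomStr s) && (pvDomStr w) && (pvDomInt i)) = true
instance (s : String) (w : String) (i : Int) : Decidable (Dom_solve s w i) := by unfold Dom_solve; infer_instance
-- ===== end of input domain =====

-- B replaces A's recursion over w (which re-slices s and searches with s.index at every step)
-- by a single for-loop over the characters of s consuming a pointer into w (alternative
-- decomposition; s is traversed once and never copied).


-- termination helper for port A: a successful read w[i] means i < len(w)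
theorem pvGet_lt {α : Type} (w : List α) (i : Int) (c : α)
    (h : PySem.List.pyGet? w i = some c) : i < w.length := by
  unfold PySem.List.pyGet? PySem.List.pyIdx? at h
  split_ifs at h <;> simp_all <;> omega

-- ===== PORT A =====
-- recursion over the remaining slice of s, exactly as the Python recursion
def solveGoA (s w : List Char) (i : Int) : String :=
  match h : PySem.List.pyGet? w i with
  | none => "NO"  -- Python raises IndexError here; excluded by Pre_solve
  | some c =>
    if c = 'o' ∧ PySem.Chars.isIn [c] s then "YES"
    else if c = 'o' ∧ ¬ (PySem.Chars.isIn [c] s = true) then "NO"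
    else
      -- c = s.index(w[i]) with ValueError ported as find = -1
      let f := PySem.Chars.find s [c]
      if f = -1 then "NO"
      else solveGoA (PySem.Chars.slice s (some (f + 1)) none) w (i + 1)
termination_by (w.length - i).toNat
decreasing_by have := pvGet_lt w i c h; omega

def solve (s : String) (w : String) (i : Int) : String :=
  solveGoA s.toList w.toList i

-- ===== PORT B =====
-- Source B's for-loop over s, as structural recursion on the list of characters of s;
-- the loop state is (i, c) with c the character w[i] currently sought
def solveGoB (s : List Char) (w : List Char) (i : Int) (c : Char) : String :=
  match s with
  | [] => "NO"
  | ch :: rest =>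
    if c = 'o' then
      if ch = 'o' then "YES" else solveGoB rest w i c
    else if ch = c then
      match PySem.List.pyGet? w (i + 1) with
      | none => "NO"  -- Python raises IndexError here; excluded by Pre_solve
      | some c' => solveGoB rest w (i + 1) c'
    else solveGoB rest w i c

def solve_alt (s : String) (w : String) (i : Int) : String :=
  match PySem.List.pyGet? w.toList i with
  | none => "NO"  -- Python raises IndexError here; excluded by Pre_solve
  | some c => solveGoB s.toList w.toList i c

-- ===== PRECONDITION & SPEC =====
-- effective remaining word A reads: w[i:] for i >= 0, and for -len(w) <= i < 0 the
-- wrapped-around tail w[len+i:] ++ w (Python's negative indexing crosses to 0 as i increments)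
def solveEff (w : List Char) (i : Int) : List Char :=
  if 0 ≤ i then w.drop i.toNat else w.drop (w.length + i).toNat ++ w

-- Pre_ excludes exactly the inputs on which A raises (IndexError reading w[i] after the scan runs
-- off the word without meeting 'o' or a missing character); A returns on every admitted input.
def Pre_solve (s : String) (w : String) (i : Int) : Prop :=
  -(w.toList.length : Int) ≤ i ∧ i < (w.toList.length : Int) ∧
    ('o' ∈ solveEff w.toList i ∨ ¬ (solveEff w.toList i).Sublist s.toList)
instance (s : String) (w : String) (i : Int) : Decidable (Pre_solve s w i) := by
  unfold Pre_solve; infer_instance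

def pvWitness_solve : String × String × Int := ("oo", "ho", 0)

def Spec_solve (s : String) (w : String) (i : Int) (out : String) : Prop := out = solve_alt s w i
instance (s : String) (w : String) (i : Int) (out : String) : Decidable (Spec_solve s w i out) := by unfold Spec_solve; infer_instance

-- ===== CLAIM (what is proved, stated in full; the proofs are below) =====
def Claim_equal_solve : Prop := ∀ (s : String) (w : String) (i : Int), Dom_solve s w i → Pre_solve s w i → Spec_solve s w i (solve s w i)

-- ===== LEMMAS AND PROOFS =====

theorem solveGoA_none (s w : List Char) (i : Int) (h : PySem.List.pyGet? w i = none) :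
    solveGoA s w i = "NO" := by
  rw [solveGoA]
  cases h2 : PySem.List.pyGet? w i with
  | none => rfl
  | some c => rw [h2] at h; cases h

theorem solveGoA_some (s w : List Char) (i : Int) (c : Char)
    (h : PySem.List.pyGet? w i = some c) :
    solveGoA s w i =
      (if c = 'o' ∧ PySem.Chars.isIn [c] s = true then "YES"
       else if c = 'o' ∧ ¬ (PySem.Chars.isIn [c] s = true) then "NO"
       else if PySem.Chars.find s [c] = -1 then "NO"
       else solveGoA (PySem.Chars.slice s (some (PySem.Chars.find s [c] + 1)) none) w (i + 1)) := by
  rw [solveGoA]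
  cases h2 : PySem.List.pyGet? w i with
  | none => rw [h2] at h; cases h
  | some c' => rw [h2] at h; injection h with h3; subst h3; rfl

-- B scanning for 'o' is membership of 'o' in the rest of s
theorem solveGoB_o (s w : List Char) (i : Int) :
    solveGoB s w i 'o' = if 'o' ∈ s then "YES" else "NO" := by
  induction s with
  | nil => simp [solveGoB]
  | cons ch rest ih =>
    by_cases hch : ch = 'o'
    · simp [solveGoB, hch]
    · simp [solveGoB, hch, ih, Ne.symm hch]

-- B scanning for an absent character (≠ 'o') returns "NO"
theorem solveGoB_absent (s w : List Char) (i : Int) (c : Char)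
    (hc : c ≠ 'o') (habs : c ∉ s) : solveGoB s w i c = "NO" := by
  induction s with
  | nil => simp [solveGoB]
  | cons ch rest ih =>
    simp only [List.mem_cons, not_or] at habs
    simp [solveGoB, hc, Ne.symm habs.1, ih habs.2]

-- B skips a prefix not containing the sought character (≠ 'o') and consumes the match
theorem solveGoB_skip (pre post w : List Char) (i : Int) (c : Char)
    (hc : c ≠ 'o') (hpre : ∀ x ∈ pre, x ≠ c) :
    solveGoB (pre ++ c :: post) w i c =
      (match PySem.List.pyGet? w (i + 1) with
       | none => "NO"
       | some c' => solveGoB post w (i + 1) c') := by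
  induction pre with
  | nil => simp [solveGoB, hc]
  | cons x xs ih =>
    have hx : x ≠ c := hpre x (by simp)
    simp only [List.cons_append, solveGoB, if_neg hc, if_neg hx]
    exact ih (fun y hy => hpre y (by simp [hy]))

-- main invariant: A on s with current character c equals B's scan of s with state (i, c)
theorem solveGoA_eq_goB (w : List Char) :
    ∀ (n : Nat) (s : List Char) (i : Int) (c : Char), s.length ≤ n →
      PySem.List.pyGet? w i = some c → solveGoA s w i = solveGoB s w i c := by
  intro n
  induction n with
  | zero =>
    intro s i c hn h
    have hs : s = [] := List.eq_nil_of_length_eq_zero (by omega)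
    subst hs
    rw [solveGoA_some [] w i c h]
    have hfind : PySem.Chars.find [] [c] = -1 := by
      rw [PySem.Chars.find_eq_neg_one_iff]
      simp
    have hisIn : PySem.Chars.isIn [c] [] = false := by
      rw [PySem.Chars.isIn_eq_false_iff]
      simp
    simp [solveGoB, hfind, hisIn]
  | succ n ih =>
    intro s i c hn h
    rw [solveGoA_some s w i c h]
    by_cases hc : c = 'o'
    · subst hc
      rw [solveGoB_o]
      by_cases hmem : 'o' ∈ s
      · have : PySem.Chars.isIn ['o'] s = true := by
          rw [PySem.Chars.isIn_iff_infix, List.singleton_infix_iff]; exact hmem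
        simp [this, hmem]
      · have : PySem.Chars.isIn ['o'] s = false := by
          rw [PySem.Chars.isIn_eq_false_iff, List.singleton_infix_iff]; exact hmem
        simp [this, hmem]
    · set f := PySem.Chars.find s [c] with hf
      by_cases hneg : f = -1
      · have habs : c ∉ s := by
          have hfind : PySem.Chars.find s [c] = -1 := by rw [← hf]; exact hneg
          have h2 : ¬ [c] <:+: s := (PySem.Chars.find_eq_neg_one_iff s [c]).mp hfind
          rw [List.singleton_infix_iff] at h2; exact h2
        rw [solveGoB_absent s w i c hc habs]
        simp [hc, hneg]
      · have hpos : 0 ≤ f := by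
          have := PySem.Chars.neg_one_le_find s [c]
          rw [← hf] at this; omega
        have hspec := PySem.Chars.find_spec (s := s) (sub := [c]) (hf ▸ hpos)
        have hmin := hspec.2
        have hpref : [c] <+: s.drop f.toNat := hspec.1
        -- decompose s = take f ++ c :: drop (f+1)
        rcases hpref with ⟨t, ht⟩
        have ht' : s.drop f.toNat = c :: t := by rw [← ht]; rfl
        have ht2 : s.drop (f.toNat + 1) = t := by
          have h4 := congrArg (List.drop 1) ht'
          simpa [List.drop_drop] using h4
        have hdrop : s.drop f.toNat = c :: s.drop (f.toNat + 1) := by rw [ht2, ht']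
        have hsplit : s = s.take f.toNat ++ c :: s.drop (f.toNat + 1) := by
          conv_lhs => rw [← List.take_append_drop f.toNat s]
          rw [hdrop]
        have hpre : ∀ x ∈ s.take f.toNat, x ≠ c := by
          intro x hx hxc
          subst hxc
          rw [List.mem_iff_getElem] at hx
          rcases hx with ⟨j, hj, hjx⟩
          have hj' : j < f.toNat ∧ j < s.length := by
            constructor
            · have h5 : j < min f.toNat s.length := by simpa using hj
              omega
            · have h5 : j < min f.toNat s.length := by simpa using hj
              omega
          have hsj : s[j]'hj'.2 = x := by
            rw [← hjx]; simp [List.getElem_take]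
          refine hmin j (by omega) ⟨s.drop (j + 1), ?_⟩
          rw [List.drop_eq_getElem_cons hj'.2, hsj]
          rfl
        have hslice : PySem.Chars.slice s (some (f + 1)) none = s.drop (f.toNat + 1) := by
          have h1 : PySem.List.slice s (some (f + 1)) none = s.drop (f + 1).toNat :=
            PySem.List.slice_from _ (by omega)
          simp only [PySem.Chars.slice_eq_listSlice, h1]
          congr 1
          omega
        rw [if_neg (by simp [hc]), if_neg (by simp [hc]), if_neg hneg, hslice]
        conv_rhs => rw [hsplit]
        rw [solveGoB_skip _ _ w i c hc hpre]
        cases h2 : PySem.List.pyGet? w (i + 1) with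
        | none => exact solveGoA_none _ w (i + 1) h2
        | some c' =>
          apply ih
          · have : (s.drop (f.toNat + 1)).length = s.length - (f.toNat + 1) := by simp
            omega
          · exact h2

-- ===== VERDICT (by name: the statement is the Claim_ definition above) =====
theorem solve_spec : Claim_equal_solve := by
  intro s w i _ _
  unfold Spec_solve solve solve_alt
  cases h : PySem.List.pyGet? w.toList i with
  | none => exact solveGoA_none _ _ _ h
  | some c => exact solveGoA_eq_goB w.toList s.toList.length s.toList i c (le_refl _) h
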